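-- pv_equiv track=rewrite | github.com/aleksandra-tucholska/paldus | fortran_code.py | rename_name
-- ===== SOURCE A (Python) =====
-- from copy import deepcopy
--
-- def rename_name(name_org, delta_list):
--     """executes delta in name of
--     the function i.e. name = 'aibjck'
--     delta_list = ['b', 'a'],
--     return aiajck
--     """
--     name = deepcopy(name_org)
--     dl = deepcopy(delta_list)
--
--     for k in range(0, len(dl)):
--         dl[k].sort()
--         for j in range(0, len(name)):
--             if name[j] == dl[k][1]:
--                 name = name[0:j] + dl[k][0] + name[j + 1:]
--
--     return name
-- ===== SOURCE B (Python) =====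
-- def rename_name(name_org, delta_list):
--     """Single pass over the characters: sort each pair once (without mutating
--     the input), then map every character through all pairs in order."""
--     pairs = [sorted(p) for p in delta_list]
--     out = []
--     for ch in name_org:
--         for p in pairs:
--             if ch == p[1]:
--                 ch = p[0]
--         out.append(ch)
--     return ''.join(out)
-- ===== Notes on version B (the rewrite author's own statement) =====
-- stated objective: alternative
-- what changed: Instead of rescanning and re-slicing the whole string once per delta pair, B sorts each pair without mutating the input and makes a single pass over the characters, applying every sorted pair to each character and joining the result.
-- outside the precondition, e.g. on rename_name('bb', [['ab', 'b']]): A returns 'aabb', B returns 'abab'; on rename_name('ba', [['', 'a']]): A returns 'b', B returns 'b'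
import Mathlib
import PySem

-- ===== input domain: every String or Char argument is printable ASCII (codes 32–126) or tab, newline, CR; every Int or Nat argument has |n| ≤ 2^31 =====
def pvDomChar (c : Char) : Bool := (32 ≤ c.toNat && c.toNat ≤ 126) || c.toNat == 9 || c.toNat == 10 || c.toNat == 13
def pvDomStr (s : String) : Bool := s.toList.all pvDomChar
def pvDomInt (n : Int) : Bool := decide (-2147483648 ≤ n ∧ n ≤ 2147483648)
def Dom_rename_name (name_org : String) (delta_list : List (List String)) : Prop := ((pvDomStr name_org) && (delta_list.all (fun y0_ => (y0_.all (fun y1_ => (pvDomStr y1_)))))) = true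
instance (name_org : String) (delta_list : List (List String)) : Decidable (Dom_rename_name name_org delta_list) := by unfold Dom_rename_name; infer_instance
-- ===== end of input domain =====

-- B replaces A's per-pair rescans of the whole, repeatedly re-sliced string by a single pass over the
-- characters, applying every sorted pair to each character (objective: alternative decomposition).

-- ===== PORT A =====
-- one iteration of A's inner loop: 'if name[j] == dl[k][1]: name = name[0:j] + dl[k][0] + name[j+1:]'
def pvAStep (small big : String) (name : List Char) (j : Int) : List Char :=
  match PySem.List.pyGet? name j with
  | none => name   -- Python raises IndexError here; such inputs lie outside Pre_rename_name
  | some c =>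
    if String.ofList [c] = big then
      PySem.List.slice name (some 0) (some j) ++ small.toList
        ++ PySem.List.slice name (some (j + 1)) none
    else name

-- one iteration of A's outer loop: 'dl[k].sort(); for j in range(0, len(name)): …'
def pvAPair (name : List Char) (pair : List String) : List Char :=
  match PySem.List.sorted pair (fun x => x.toList) false with
  | small :: big :: _ =>
      (PySem.List.pyRange 0 (name.length : Int)).foldl (pvAStep small big) name
  | _ => name   -- dl[k][1] raises IndexError on the first iteration when name ≠ ''; outside Pre_rename_name

def rename_name (name_org : String) (delta_list : List (List String)) : String :=
  String.ofList (delta_list.foldl pvAPair name_org.toList)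

-- ===== PORT B =====
-- B's inner loop: 'for p in pairs: if ch == p[1]: ch = p[0]'
def pvBChar (pairs : List (List String)) (ch : String) : String :=
  pairs.foldl (fun ch p =>
    match p[1]? with
    | some big => if ch = big then p.getD 0 ch else ch
    | none => ch   -- Python raises IndexError here; outside Pre_rename_name
    ) ch

def rename_name_alt (name_org : String) (delta_list : List (List String)) : String :=
  let pairs := delta_list.map (fun p => PySem.List.sorted p (fun x => x.toList) false)
  PySem.Str.join "" (name_org.toList.map (fun c => pvBChar pairs (String.ofList [c])))

-- ===== PRECONDITION & SPEC =====
-- the characters a position of the evolving name can ever hold: those of name_org plus those of the pairs' smaller elements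
def pvReach (name_org : String) (delta_list : List (List String)) : List Char :=
  name_org.toList ++ delta_list.flatMap
    (fun q => ((PySem.List.sorted q (fun x => x.toList) false).getD 0 "").toList)

-- Pre_ excludes (for a nonempty name) pairs with fewer than two elements — there A raises IndexError at
-- dl[k][1] — and pairs whose smaller element is not a single character while the larger one is a single
-- character that can actually occur in the name: there A either raises IndexError or returns a value shaped
-- by the stale range(0, len(name)) indices after the string changes length, a corner no caller specifies.
def Pre_rename_name (name_org : String) (delta_list : List (List String)) : Prop :=
  name_org = "" ∨ ∀ p ∈ delta_list, 2 ≤ p.length ∧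
    (((PySem.List.sorted p (fun x => x.toList) false).getD 0 "").toList.length = 1
     ∨ ((PySem.List.sorted p (fun x => x.toList) false).getD 1 "").toList.length ≠ 1
     ∨ ((PySem.List.sorted p (fun x => x.toList) false).getD 1 "").toList.headD ' '
         ∉ pvReach name_org delta_list)
instance (name_org : String) (delta_list : List (List String)) : Decidable (Pre_rename_name name_org delta_list) := by unfold Pre_rename_name; infer_instance

def pvWitness_rename_name : String × List (List String) := ("aibjck", [["b", "a"]])

def Spec_rename_name (name_org : String) (delta_list : List (List String)) (out : String) : Prop := out = rename_name_alt name_org delta_list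
instance (name_org : String) (delta_list : List (List String)) (out : String) : Decidable (Spec_rename_name name_org delta_list out) := by unfold Spec_rename_name; infer_instance

-- ===== CLAIM (what is proved, stated in full; the proofs are below) =====
def Claim_equal_rename_name : Prop := ∀ (name_org : String) (delta_list : List (List String)), Dom_rename_name name_org delta_list → Pre_rename_name name_org delta_list → Spec_rename_name name_org delta_list (rename_name name_org delta_list)

-- ===== LEMMAS AND PROOFS =====

-- the character map a single (sorted) pair performs
def pvF (p : List String) (c : Char) : Char :=
  match PySem.List.sorted p (fun x => x.toList) false with
  | a :: b :: _ => if String.ofList [c] = b then a.toList.headD c else c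
  | _ => c

-- what Pre_ guarantees about a pair, relative to the reachable-character list R
def pvGood (R : List Char) (p : List String) : Prop :=
  2 ≤ (PySem.List.sorted p (fun x => x.toList) false).length ∧
  (∀ c ∈ ((PySem.List.sorted p (fun x => x.toList) false).getD 0 "").toList, c ∈ R) ∧
  (((PySem.List.sorted p (fun x => x.toList) false).getD 0 "").toList.length = 1
   ∨ ((PySem.List.sorted p (fun x => x.toList) false).getD 1 "").toList.length ≠ 1
   ∨ ((PySem.List.sorted p (fun x => x.toList) false).getD 1 "").toList.headD ' ' ∉ R)

-- A's inner loop, run over the index list: whenever every match replaces by a single character,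
-- it is the pointwise character map (invariant: the processed prefix is already mapped)
theorem pvAStep_fold (small big : String)
    (rest : List Char)
    (h : ∀ c ∈ rest, String.ofList [c] = big → small.toList.length = 1) :
    ∀ done : List Char,
    (List.range' done.length rest.length).foldl
        (fun acc (j : Nat) => pvAStep small big acc (j : Int)) (done ++ rest)
      = done ++ rest.map (fun c => if String.ofList [c] = big then small.toList.headD c else c) := by
  induction rest with
  | nil => intro done; simp
  | cons c rest ih =>
    intro done
    have hrest : ∀ c' ∈ rest, String.ofList [c'] = big → small.toList.length = 1 :=
      fun c' hc' => h c' (List.mem_cons_of_mem _ hc')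
    have hlen : (c :: rest).length = rest.length + 1 := rfl
    rw [hlen, List.range'_succ, List.foldl_cons]
    have hidx : PySem.List.pyGet? (done ++ c :: rest) ((done.length : Nat) : Int) = some c := by
      rw [PySem.List.pyGet?_natCast]
      simp
    by_cases hc : String.ofList [c] = big
    · have hsl : small.toList.length = 1 := h c (List.mem_cons_self) hc
      obtain ⟨s0, hs0⟩ := List.length_eq_one_iff.mp hsl
      have htake : PySem.List.slice (done ++ c :: rest) (some 0) (some (done.length : Int))
          = done := by
        have h0 : (0 : Int) = ((0 : Nat) : Int) := rfl
        rw [h0, PySem.List.slice_natCast]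
        simp
      have hdrop : PySem.List.slice (done ++ c :: rest) (some ((done.length : Int) + 1)) none
          = rest := by
        have h1 : ((done.length : Int) + 1) = ((done.length + 1 : Nat) : Int) := by push_cast; ring
        rw [h1, PySem.List.slice_from _ (by positivity)]
        simp
      have hstep : pvAStep small big (done ++ c :: rest) (done.length : Int)
          = (done ++ [s0]) ++ rest := by
        simp only [pvAStep, hidx, hc, htake, hdrop, hs0]
        simp
      rw [hstep]
      have := ih hrest (done ++ [s0])
      simp only [List.length_append, List.length_cons, List.length_nil] at this ⊢
      rw [this]
      simp [hc, hs0]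
    · have hstep : pvAStep small big (done ++ c :: rest) (done.length : Int)
          = (done ++ [c]) ++ rest := by
        simp only [pvAStep, hidx]
        simp [hc]
      rw [hstep]
      have := ih hrest (done ++ [c])
      simp only [List.length_append, List.length_cons, List.length_nil] at this ⊢
      rw [this]
      simp [hc]

theorem pvAPair_eq_map (R : List Char) (p : List String) (cs : List Char)
    (hp : pvGood R p) (hcs : ∀ c ∈ cs, c ∈ R) :
    pvAPair cs p = cs.map (pvF p) := by
  obtain ⟨hlen, hmin, hdis⟩ := hp
  cases hsp : PySem.List.sorted p (fun x => x.toList) false with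
  | nil => rw [hsp] at hlen; simp at hlen
  | cons a t =>
    cases t with
    | nil => rw [hsp] at hlen; simp at hlen
    | cons b t' =>
      rw [hsp] at hdis
      simp only [List.getD_cons_zero, List.getD_cons_succ] at hdis
      have hmatch : ∀ c ∈ cs, String.ofList [c] = b → a.toList.length = 1 := by
        intro c hcmem hcb
        rcases hdis with h1 | h2 | h3
        · exact h1
        · exact absurd (by rw [← hcb]; simp) h2
        · exact absurd (by rw [← hcb]; simpa using hcs c hcmem) h3
      unfold pvAPair
      rw [hsp]
      show (PySem.List.pyRange 0 (cs.length : Int)).foldl (pvAStep a b) cs = List.map (pvF p) cs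
      rw [PySem.List.pyRange_zero_natCast, List.foldl_map, List.range_eq_range']
      have := pvAStep_fold a b cs hmatch []
      simp only [List.length_nil, List.nil_append] at this
      rw [this]
      apply List.map_congr_left
      intro c hcmem
      simp [pvF, hsp]

theorem pvF_mem (R : List Char) (p : List String) (c : Char)
    (hp : pvGood R p) (hc : c ∈ R) : pvF p c ∈ R := by
  obtain ⟨hlen, hmin, hdis⟩ := hp
  cases hsp : PySem.List.sorted p (fun x => x.toList) false with
  | nil => simp [pvF, hsp]; exact hc
  | cons a t =>
    cases t with
    | nil => simp [pvF, hsp]; exact hc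
    | cons b t' =>
      rw [hsp] at hmin
      simp only [List.getD_cons_zero] at hmin
      simp only [pvF, hsp]
      split
      · cases ha : a.toList with
        | nil => simpa [ha] using hc
        | cons x xs => simp only [List.headD_cons]; exact hmin x (by rw [ha]; simp)
      · exact hc

theorem pvA_fold_eq_map (R : List Char) :
    ∀ (ps : List (List String)) (cs : List Char),
    (∀ p ∈ ps, pvGood R p) → (∀ c ∈ cs, c ∈ R) →
    ps.foldl pvAPair cs = cs.map (fun c => ps.foldl (fun c p => pvF p c) c) := by
  intro ps
  induction ps with
  | nil => intro cs _ _; simp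
  | cons p ps ih =>
    intro cs hgood hcs
    have hp := hgood p (List.mem_cons_self)
    rw [List.foldl_cons, pvAPair_eq_map R p cs hp hcs]
    rw [ih (cs.map (pvF p)) (fun q hq => hgood q (List.mem_cons_of_mem _ hq))
        (by intro c hc; obtain ⟨c0, hc0, rfl⟩ := List.mem_map.mp hc; exact pvF_mem R p c0 hp (hcs c0 hc0))]
    simp [List.map_map, Function.comp]

theorem pvBChar_eq (R : List Char) :
    ∀ (ps : List (List String)) (c : Char),
    (∀ p ∈ ps, pvGood R p) → c ∈ R →
    pvBChar (ps.map (fun p => PySem.List.sorted p (fun x => x.toList) false)) (String.ofList [c])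
      = String.ofList [ps.foldl (fun c p => pvF p c) c] := by
  intro ps
  induction ps with
  | nil => intro c _ _; simp [pvBChar]
  | cons p ps ih =>
    intro c hgood hc
    obtain ⟨hlen, hmin, hdis⟩ := hgood p (List.mem_cons_self)
    have hgood' := fun q hq => hgood q (List.mem_cons_of_mem _ hq)
    cases hsp : PySem.List.sorted p (fun x => x.toList) false with
    | nil => rw [hsp] at hlen; simp at hlen
    | cons a t =>
      cases t with
      | nil => rw [hsp] at hlen; simp at hlen
      | cons b t' =>
        rw [hsp] at hdis hmin
        simp only [List.getD_cons_zero, List.getD_cons_succ] at hdis hmin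
        have hstep : pvBChar ((p :: ps).map (fun q => PySem.List.sorted q (fun x => x.toList) false)) (String.ofList [c])
            = pvBChar (ps.map (fun q => PySem.List.sorted q (fun x => x.toList) false))
                (if String.ofList [c] = b then (a :: b :: t').getD 0 (String.ofList [c]) else String.ofList [c]) := by
          simp only [pvBChar, List.map_cons, List.foldl_cons, hsp]
          rfl
        have hfold : (p :: ps).foldl (fun c q => pvF q c) c = ps.foldl (fun c q => pvF q c) (pvF p c) := rfl
        rw [hstep, hfold]
        by_cases hcb : String.ofList [c] = b
        · have ha1 : a.toList.length = 1 := by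
            rcases hdis with h1 | h2 | h3
            · exact h1
            · exact absurd (by rw [← hcb]; simp) h2
            · exact absurd (by rw [← hcb]; simpa using hc) h3
          obtain ⟨a0, ha0⟩ := List.length_eq_one_iff.mp ha1
          have haeq : a = String.ofList [a0] := by rw [← String.toList_inj]; simp [ha0]
          have hpf : pvF p c = a0 := by simp [pvF, hsp, hcb, ha0]
          rw [if_pos hcb, List.getD_cons_zero, hpf, haeq]
          exact ih a0 hgood' (hmin a0 (by rw [ha0]; simp))
        · have hpf : pvF p c = c := by simp [pvF, hsp, hcb]
          rw [if_neg hcb, hpf]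
          exact ih c hgood' hc

theorem pvAPair_nil (p : List String) : pvAPair [] p = [] := by
  unfold pvAPair
  split
  · have h0 : PySem.List.pyRange 0 ((([] : List Char).length : Int)) = [] := by decide
    rw [h0]
    rfl
  · rfl

theorem pv_main : ∀ (name_org : String) (delta_list : List (List String)),
    Pre_rename_name name_org delta_list →
    rename_name name_org delta_list = rename_name_alt name_org delta_list := by
  intro name delta hpre
  rcases hpre with hempty | hall
  · subst hempty
    have hnil : ("" : String).toList = [] := rfl
    have hA : delta.foldl pvAPair (("" : String).toList) = [] := by
      rw [hnil]
      induction delta with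
      | nil => rfl
      | cons p ps ih => rw [List.foldl_cons, pvAPair_nil]; exact ih
    unfold rename_name rename_name_alt
    rw [hA, hnil]
    show String.ofList [] = PySem.Str.join "" (List.map (fun c =>
      pvBChar (delta.map (fun p => PySem.List.sorted p (fun x => x.toList) false)) (String.ofList [c])) [])
    rw [List.map_nil]
    decide
  · have hgood : ∀ p ∈ delta, pvGood (pvReach name delta) p := by
      intro p hpmem
      obtain ⟨h2, hdis⟩ := hall p hpmem
      refine ⟨?_, ?_, hdis⟩
      · have := (PySem.List.sorted_perm p (fun x => x.toList) false).length_eq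
        omega
      · intro c hcmem
        exact List.mem_append_right _ (List.mem_flatMap.mpr ⟨p, hpmem, hcmem⟩)
    have hcs : ∀ c ∈ name.toList, c ∈ pvReach name delta :=
      fun c hc => List.mem_append_left _ hc
    unfold rename_name rename_name_alt
    rw [pvA_fold_eq_map (pvReach name delta) delta name.toList hgood hcs]
    rw [← String.toList_inj, PySem.Str.toList_join]
    simp only [String.toList_ofList, List.map_map, Function.comp_def]
    have hmapeq : name.toList.map (fun c =>
          (pvBChar (delta.map (fun p => PySem.List.sorted p (fun x => x.toList) false)) (String.ofList [c])).toList)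
        = name.toList.map (fun c => [delta.foldl (fun c p => pvF p c) c]) := by
      apply List.map_congr_left
      intro c hc
      rw [pvBChar_eq (pvReach name delta) delta c hgood (hcs c hc)]
      simp
    rw [hmapeq]
    have hsing : name.toList.map (fun c => [delta.foldl (fun c p => pvF p c) c])
        = (name.toList.map (fun c => delta.foldl (fun c p => pvF p c) c)).map (fun x => [x]) := by
      rw [List.map_map]
      rfl
    rw [hsing]
    have hjoin := PySem.Chars.join_nil_singletons
      (name.toList.map (fun c => delta.foldl (fun c p => pvF p c) c))
    rw [show ("" : String).toList = [] from rfl]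
    exact hjoin.symm

-- ===== VERDICT (by name: the statement is the Claim_ definition above) =====
theorem rename_name_spec : Claim_equal_rename_name := by
  intro name_org delta_list _ hpre
  exact pv_main name_org delta_list hpre
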